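-- pv_equiv track=rewrite | github.com/socaya/superset | superset/db_engine_specs/dhis2_dialect.py | _extract_dimension_values
-- ===== SOURCE A (Python) =====
-- def _extract_dimension_values(dimension_str: str, dimension_type: str) -> list[str]:
--     """
--     Extract specific dimension values from DHIS2 dimension string
--
--     Args:
--         dimension_str: Dimension string like "dx:id1;id2;pe:LAST_YEAR;ou:OU1;OU2"
--         dimension_type: Dimension type to extract ("dx", "pe", or "ou")
--
--     Returns:
--         List of values for the specified dimension type
--     """
--     if not dimension_str:
--         return []
--
--     values = []
--     parts = dimension_str.split(";")
--
--     for part in parts: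
--         if part.startswith(f"{dimension_type}:"):
--             # Extract the value after the dimension prefix
--             value_part = part[len(f"{dimension_type}:") :]
--             if value_part:
--                 values.append(value_part)
--
--     return values
-- ===== SOURCE B (Python) =====
-- import re
--
--
-- def _extract_dimension_values(dimension_str: str, dimension_type: str) -> list[str]:
--     """Single regex pass: capture every non-empty value that follows a
--     boundary-anchored '<dimension_type>:' prefix."""
--     return re.findall(rf"(?:^|;){re.escape(dimension_type)}:([^;]+)", dimension_str)
-- ===== Notes on version B (the rewrite author's own statement) =====
-- stated objective: idiomatic
-- what changed: Replaces the split(';')-then-loop-slice-and-filter with a single re.findall pass whose boundary-anchored pattern (?:^|;)type:([^;]+) captures each non-empty value directly.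
-- outside the precondition, e.g. on _extract_dimension_values('a;b:x', 'a;b'): A returns [], B returns ['x']
import Mathlib
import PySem

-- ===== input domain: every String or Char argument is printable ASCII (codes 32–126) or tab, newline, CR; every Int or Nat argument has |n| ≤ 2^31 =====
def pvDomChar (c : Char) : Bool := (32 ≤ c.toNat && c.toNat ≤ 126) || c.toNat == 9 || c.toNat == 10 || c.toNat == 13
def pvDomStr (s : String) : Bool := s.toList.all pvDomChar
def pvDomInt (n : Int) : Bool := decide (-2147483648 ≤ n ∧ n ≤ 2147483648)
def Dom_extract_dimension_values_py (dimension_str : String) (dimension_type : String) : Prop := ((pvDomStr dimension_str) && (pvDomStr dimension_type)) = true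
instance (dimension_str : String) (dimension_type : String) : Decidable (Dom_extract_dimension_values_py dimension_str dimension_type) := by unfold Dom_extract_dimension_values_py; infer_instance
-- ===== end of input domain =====

-- B replaces A's split(';')/loop/slice with one boundary-anchored regex pass (ported here as an explicit scan); objective: idiomatic, same cost.


-- ===== PORT A =====
-- literal transliteration of A: guard on empty string, split on ";", keep parts that
-- start with f"{dimension_type}:", slice off the prefix, append non-empty values.
def extract_dimension_values_py (dimension_str : String) (dimension_type : String) : List String :=
  if dimension_str.toList = [] then []
  else
    let parts : List (List Char) := PySem.Chars.splitOn dimension_str.toList [';']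
    (parts.foldl (fun values part =>
      if PySem.Chars.startswith part (dimension_type.toList ++ [':']) then
        let value_part := PySem.List.slice part (some ((dimension_type.toList ++ [':']).length : Int)) none
        if value_part ≠ [] then values ++ [value_part] else values
      else values) ([] : List (List Char))).map String.ofList

-- ===== PORT B =====
-- Hand port (exact on the admitted inputs) of Source B's single library call
-- re.findall(rf"(?:^|;){re.escape(dimension_type)}:([^;]+)", dimension_str):
-- pvReTryAt matches the literal 'pat' followed by the greedy non-empty capture
-- [^;]+ at the current position; pvReScan is the engine's left-to-right scan,
-- whose ';' boundary alternative fires at a ';' and which resumes scanning at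
-- the end of each match.
def pvReTryAt (pat l : List Char) : Option (List Char × List Char) :=
  if pat.isPrefixOf l then
    let after := l.drop pat.length
    let cap := after.takeWhile (fun c => c ≠ ';')
    if cap = [] then none else some (cap, after.drop cap.length)
  else none

theorem pvReTryAt_length_le {pat l cap r : List Char}
    (h : pvReTryAt pat l = some (cap, r)) : r.length ≤ l.length := by
  unfold pvReTryAt at h
  split at h
  · dsimp at h
    split at h
    · exact absurd h (by simp)
    · cases h
      simp only [List.length_drop]
      omega
  · exact absurd h (by simp)

def pvReScan (pat : List Char) : List Char → List (List Char)
  | [] => []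
  | c :: rest =>
    if c = ';' then
      match h : pvReTryAt pat rest with
      | some (cap, r) => cap :: pvReScan pat r
      | none => pvReScan pat rest
    else pvReScan pat rest
termination_by l => l.length
decreasing_by
  · have := pvReTryAt_length_le h; simp; omega
  · simp
  · simp

def extract_dimension_values_py_alt (dimension_str : String) (dimension_type : String) : List String :=
  let pat := dimension_type.toList ++ [':']
  let l := dimension_str.toList
  (match pvReTryAt pat l with       -- the '^' alternative of the anchor, tried at position 0
   | some (cap, r) => cap :: pvReScan pat r
   | none => pvReScan pat l).map String.ofList

-- ===== PRECONDITION & SPEC =====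
-- Pre_ excludes dimension_type containing the separator ';' (never a valid DHIS2
-- dimension type): there A's split can never see the prefix and returns [], while
-- B's boundary regex may match across a separator — an unspecified corner.
def Pre_extract_dimension_values_py (dimension_str : String) (dimension_type : String) : Prop :=
  ';' ∉ dimension_type.toList
instance (dimension_str : String) (dimension_type : String) : Decidable (Pre_extract_dimension_values_py dimension_str dimension_type) := by unfold Pre_extract_dimension_values_py; infer_instance

def pvWitness_extract_dimension_values_py : String × String := ("dx:id1;id2;pe:LAST_YEAR;ou:OU1", "ou")

def Spec_extract_dimension_values_py (dimension_str : String) (dimension_type : String) (out : List String) : Prop := out = extract_dimension_values_py_alt dimension_str dimension_type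
instance (dimension_str : String) (dimension_type : String) (out : List String) : Decidable (Spec_extract_dimension_values_py dimension_str dimension_type out) := by unfold Spec_extract_dimension_values_py; infer_instance

-- ===== CLAIM (what is proved, stated in full; the proofs are below) =====
def Claim_equal_extract_dimension_values_py : Prop := ∀ (dimension_str : String) (dimension_type : String), Dom_extract_dimension_values_py dimension_str dimension_type → Pre_extract_dimension_values_py dimension_str dimension_type → Spec_extract_dimension_values_py dimension_str dimension_type (extract_dimension_values_py dimension_str dimension_type)

-- ===== LEMMAS AND PROOFS =====

-- reference shape: the one-char split on ';' as a plain front-building recursion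
def pvConsHead (c : Char) : List (List Char) → List (List Char)
  | [] => [[c]]
  | t :: ts => (c :: t) :: ts

def pvSplit : List Char → List (List Char)
  | [] => [[]]
  | c :: rest => if c = ';' then [] :: pvSplit rest else pvConsHead c (pvSplit rest)

def pvMapHead (f : List Char → List Char) : List (List Char) → List (List Char)
  | [] => []
  | t :: ts => f t :: ts

theorem pvSplit_ne_nil (l : List Char) : pvSplit l ≠ [] := by
  cases l with
  | nil => simp [pvSplit]
  | cons c rest =>
    simp only [pvSplit]
    split
    · simp
    · cases h : pvSplit rest <;> simp [pvConsHead]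

theorem pvMapHead_id (ts : List (List Char)) : pvMapHead (fun t => t) ts = ts := by
  cases ts <;> simp [pvMapHead]

theorem splitOn_go_eq : ∀ (l : List Char) (fuel : Nat) (cur : List Char) (acc : List (List Char)),
    l.length < fuel →
    PySem.Chars.splitOn.go [';'] fuel l cur acc
      = acc.reverse ++ pvMapHead (fun t => cur.reverse ++ t) (pvSplit l) := by
  intro l
  induction l with
  | nil =>
    intro fuel cur acc hf
    obtain ⟨f, rfl⟩ : ∃ f, fuel = f + 1 := ⟨fuel - 1, by omega⟩
    simp [PySem.Chars.splitOn.go, pvSplit, pvMapHead]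
  | cons c rest ih =>
    intro fuel cur acc hf
    obtain ⟨f, rfl⟩ : ∃ f, fuel = f + 1 := ⟨fuel - 1, by omega⟩
    have hf' : rest.length < f := by simp at hf; omega
    by_cases hc : c = ';'
    · subst hc
      simp only [PySem.Chars.splitOn.go, List.isPrefixOf, BEq.rfl, Bool.and_self, if_pos]
      rw [show List.drop [';'].length (';' :: rest) = rest from rfl]
      rw [ih f [] (cur.reverse :: acc) hf']
      simp only [pvSplit, if_pos rfl, List.reverse_cons, List.reverse_nil,
        List.nil_append, List.append_assoc, List.singleton_append]
      rcases pvSplit rest with _ | ⟨t0, ts⟩ <;> simp [pvMapHead]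
    · simp only [PySem.Chars.splitOn.go, List.isPrefixOf]
      have hbeq : ((';' : Char) == c) = false := by
        simp only [beq_eq_false_iff_ne, ne_eq]
        exact fun hh => hc hh.symm
      simp only [hbeq, Bool.false_and, Bool.false_eq_true, if_false]
      rw [ih f (c :: cur) acc hf']
      rcases hsp : pvSplit rest with _ | ⟨t0, ts⟩
      · exact absurd hsp (pvSplit_ne_nil rest)
      · simp [pvSplit, hc, hsp, pvConsHead, pvMapHead]

theorem splitOn_eq (l : List Char) : PySem.Chars.splitOn l [';'] = pvSplit l := by
  unfold PySem.Chars.splitOn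
  rw [splitOn_go_eq l (l.length + 1) [] [] (by omega)]
  simp [pvMapHead_id]

-- the fold step of A, abstracted over the prefix
def pvStep (pat : List Char) (values : List (List Char)) (part : List Char) : List (List Char) :=
  if PySem.Chars.startswith part pat then
    if part.drop pat.length ≠ [] then values ++ [part.drop pat.length] else values
  else values

theorem pvStep_nil (pat part : List Char) :
    pvStep pat [] part
      = if pat.isPrefixOf part ∧ part.drop pat.length ≠ [] then [part.drop pat.length] else [] := by
  unfold pvStep PySem.Chars.startswith
  by_cases h1 : pat.isPrefixOf part <;> by_cases h2 : part.drop pat.length = [] <;> simp [h1, h2]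

theorem portA_foldl_eq (pat : List Char) (parts : List (List Char)) :
    parts.foldl (fun values part =>
      if PySem.Chars.startswith part pat then
        let value_part := PySem.List.slice part (some (pat.length : Int)) none
        if value_part ≠ [] then values ++ [value_part] else values
      else values) [] = parts.foldl (pvStep pat) [] := by
  congr 1
  funext values part
  rw [PySem.List.slice_from_natCast]
  rfl

theorem foldl_pvStep_acc (pat : List Char) (ts : List (List Char)) :
    ∀ acc, ts.foldl (pvStep pat) acc = acc ++ ts.foldl (pvStep pat) [] := by
  induction ts with
  | nil => intro acc; simp
  | cons t ts ih =>
    intro acc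
    simp only [List.foldl_cons]
    rw [ih (pvStep pat acc t), ih (pvStep pat [] t)]
    have hstep : pvStep pat acc t = acc ++ pvStep pat [] t := by
      unfold pvStep; split_ifs <;> simp
    rw [hstep, List.append_assoc]

-- B's start-of-string behaviour: the '^' alternative, then the scan
def pvBStart (pat l : List Char) : List (List Char) :=
  match pvReTryAt pat l with
  | some (cap, r) => cap :: pvReScan pat r
  | none => pvReScan pat l

theorem pvBStart_of_some {pat l cap r : List Char} (h : pvReTryAt pat l = some (cap, r)) :
    pvBStart pat l = cap :: pvReScan pat r := by
  unfold pvBStart; rw [h]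

theorem pvBStart_of_none {pat l : List Char} (h : pvReTryAt pat l = none) :
    pvBStart pat l = pvReScan pat l := by
  unfold pvBStart; rw [h]

theorem pvReScan_semifree (pat : List Char) : ∀ l : List Char, ';' ∉ l → pvReScan pat l = [] := by
  intro l
  induction l with
  | nil => intro _; simp [pvReScan]
  | cons c rest ih =>
    intro h
    simp only [List.mem_cons, not_or] at h
    have hc : ¬ (c = ';') := fun hh => h.1 hh.symm
    simp [pvReScan, hc, ih h.2]

theorem pvReScan_skip (pat : List Char) : ∀ a m : List Char, ';' ∉ a →
    pvReScan pat (a ++ ';' :: m) = pvReScan pat (';' :: m) := by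
  intro a
  induction a with
  | nil => intro m _; rfl
  | cons c a ih =>
    intro m h
    simp only [List.mem_cons, not_or] at h
    have hc : ¬ (c = ';') := fun hh => h.1 hh.symm
    simp only [List.cons_append]
    rw [show pvReScan pat (c :: (a ++ ';' :: m)) = pvReScan pat (a ++ ';' :: m) by
      simp [pvReScan, hc]]
    exact ih m h.2

theorem pvReScan_semi_cons (pat m : List Char) : pvReScan pat (';' :: m) = pvBStart pat m := by
  simp only [pvReScan, reduceIte]
  split
  · rename_i cap r heq
    rw [pvBStart_of_some heq]
  · rename_i heq
    rw [pvBStart_of_none heq]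

theorem pvSplit_semifree : ∀ a : List Char, ';' ∉ a → pvSplit a = [a] := by
  intro a
  induction a with
  | nil => intro _; simp [pvSplit]
  | cons c rest ih =>
    intro h
    simp only [List.mem_cons, not_or] at h
    have hc : ¬ (c = ';') := fun hh => h.1 hh.symm
    simp [pvSplit, hc, ih h.2, pvConsHead]

theorem pvSplit_append : ∀ a m : List Char, ';' ∉ a →
    pvSplit (a ++ ';' :: m) = a :: pvSplit m := by
  intro a
  induction a with
  | nil => intro m _; simp [pvSplit]
  | cons c a ih =>
    intro m h
    simp only [List.mem_cons, not_or] at h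
    have hc : ¬ (c = ';') := fun hh => h.1 hh.symm
    simp [pvSplit, hc, ih m h.2, pvConsHead]

theorem pvDecomp (l : List Char) : (';' ∉ l) ∨ ∃ a m, l = a ++ ';' :: m ∧ ';' ∉ a := by
  induction l with
  | nil => left; simp
  | cons c rest ih =>
    by_cases hc : c = ';'
    · right; exact ⟨[], rest, by simp [hc], by simp⟩
    · rcases ih with h | ⟨a, m, hlm, ha⟩
      · left
        intro hmem
        rcases List.mem_cons.mp hmem with h1 | h1
        · exact hc h1.symm
        · exact h h1
      · right
        refine ⟨c :: a, m, by simp [hlm], ?_⟩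
        intro hmem
        rcases List.mem_cons.mp hmem with h1 | h1
        · exact hc h1.symm
        · exact ha h1

theorem pvPrefix_append_iff (pat a m : List Char) (hpat : ';' ∉ pat) :
    pat <+: (a ++ ';' :: m) ↔ pat <+: a := by
  constructor
  · intro h
    rcases Nat.lt_or_ge a.length pat.length with hlt | hge
    · exfalso
      have h2 : (a ++ [';']) <+: (a ++ ';' :: m) := ⟨m, by simp⟩
      have h3 : (a ++ [';']) <+: pat :=
        List.prefix_of_prefix_length_le h2 h (by simp; omega)
      exact hpat (h3.subset (by simp))
    · exact List.prefix_of_prefix_length_le h (List.prefix_append a (';' :: m)) hge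
  · intro h; exact h.trans (List.prefix_append a (';' :: m))

theorem pvTakeWhile_semifree : ∀ a : List Char, ';' ∉ a →
    a.takeWhile (fun c => c ≠ ';') = a := by
  intro a
  induction a with
  | nil => intro _; rfl
  | cons c rest ih =>
    intro h
    simp only [List.mem_cons, not_or] at h
    have hcn : ¬ (c = ';') := fun hh => h.1 hh.symm
    simp [hcn]
    intro x hx hxx
    exact h.2 (hxx ▸ hx)

theorem pvTakeWhile_append : ∀ a m : List Char, ';' ∉ a →
    (a ++ ';' :: m).takeWhile (fun c => c ≠ ';') = a := by
  intro a
  induction a with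
  | nil =>
    intro m _
    rw [List.nil_append, List.takeWhile_cons_of_neg (by simp)]
  | cons c rest ih =>
    intro m h
    simp only [List.mem_cons, not_or] at h
    have hcn : ¬ (c = ';') := fun hh => h.1 hh.symm
    simp only [List.cons_append, List.takeWhile_cons]
    rw [if_pos (show decide (c ≠ ';') = true by simp [hcn])]
    exact congrArg (List.cons c) (ih m h.2)

theorem pvReTryAt_char (pat a m : List Char) (hpat : ';' ∉ pat) (ha : ';' ∉ a) :
    pvReTryAt pat (a ++ ';' :: m)
      = if pat.isPrefixOf a ∧ a.drop pat.length ≠ [] then some (a.drop pat.length, ';' :: m)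
        else none := by
  by_cases hp : pat <+: a
  · obtain ⟨a', rfl⟩ := hp
    have ha' : ';' ∉ a' := fun hmem => ha (List.mem_append.mpr (Or.inr hmem))
    have hpre1 : pat.isPrefixOf (pat ++ a') = true :=
      List.isPrefixOf_iff_prefix.mpr (List.prefix_append _ _)
    have hpre2 : pat.isPrefixOf (pat ++ (a' ++ ';' :: m)) = true :=
      List.isPrefixOf_iff_prefix.mpr (List.prefix_append _ _)
    have e1 : List.drop pat.length (pat ++ (a' ++ ';' :: m)) = a' ++ ';' :: m := List.drop_left
    have e2 : List.drop pat.length (pat ++ a') = a' := List.drop_left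
    have e3 : (a' ++ ';' :: m).takeWhile (fun c => c ≠ ';') = a' := pvTakeWhile_append a' m ha'
    have e4 : List.drop a'.length (a' ++ ';' :: m) = ';' :: m := List.drop_left
    unfold pvReTryAt
    rw [List.append_assoc]
    rw [if_pos hpre2]
    simp only [e1, e3, e4, e2]
    by_cases he : a' = [] <;> simp [he, hpre1]
  · have hp2 : ¬ (pat <+: (a ++ ';' :: m)) := fun hcon =>
      hp ((pvPrefix_append_iff pat a m hpat).mp hcon)
    have hb1 : pat.isPrefixOf (a ++ ';' :: m) = false := by
      rw [Bool.eq_false_iff]; intro hh; exact hp2 (List.isPrefixOf_iff_prefix.mp hh)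
    have hb2 : pat.isPrefixOf a = false := by
      rw [Bool.eq_false_iff]; intro hh; exact hp (List.isPrefixOf_iff_prefix.mp hh)
    unfold pvReTryAt
    simp [hb1, hb2]

theorem pvReTryAt_last (pat a : List Char) (ha : ';' ∉ a) :
    pvReTryAt pat a
      = if pat.isPrefixOf a ∧ a.drop pat.length ≠ [] then some (a.drop pat.length, []) else none := by
  by_cases hp : pat <+: a
  · obtain ⟨a', rfl⟩ := hp
    have ha' : ';' ∉ a' := fun hmem => ha (List.mem_append.mpr (Or.inr hmem))
    have hpre1 : pat.isPrefixOf (pat ++ a') = true :=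
      List.isPrefixOf_iff_prefix.mpr (List.prefix_append _ _)
    have e2 : List.drop pat.length (pat ++ a') = a' := List.drop_left
    have e3 : a'.takeWhile (fun c => c ≠ ';') = a' := pvTakeWhile_semifree a' ha'
    have e4 : List.drop a'.length a' = [] := List.drop_length
    unfold pvReTryAt
    rw [if_pos hpre1]
    simp only [e2, e3, e4]
    by_cases he : a' = [] <;> simp [he, hpre1]
  · have hb : pat.isPrefixOf a = false := by
      rw [Bool.eq_false_iff]; intro hh; exact hp (List.isPrefixOf_iff_prefix.mp hh)
    unfold pvReTryAt
    simp [hb]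

theorem pvBStart_append (pat a m : List Char) (hpat : ';' ∉ pat) (ha : ';' ∉ a) :
    pvBStart pat (a ++ ';' :: m)
      = (if pat.isPrefixOf a ∧ a.drop pat.length ≠ [] then [a.drop pat.length] else [])
          ++ pvBStart pat m := by
  by_cases hc : pat.isPrefixOf a ∧ a.drop pat.length ≠ []
  · rw [pvBStart_of_some (by rw [pvReTryAt_char pat a m hpat ha, if_pos hc])]
    rw [pvReScan_semi_cons, if_pos hc]
    simp
  · rw [pvBStart_of_none (by rw [pvReTryAt_char pat a m hpat ha, if_neg hc])]
    rw [pvReScan_skip pat a m ha, pvReScan_semi_cons, if_neg hc]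
    simp

-- the central equality, on char lists
theorem pvMain (pat : List Char) (hpat : ';' ∉ pat) :
    ∀ l, (pvSplit l).foldl (pvStep pat) [] = pvBStart pat l := by
  suffices H : ∀ n, ∀ l : List Char, l.length = n →
      (pvSplit l).foldl (pvStep pat) [] = pvBStart pat l by
    intro l; exact H l.length l rfl
  intro n
  induction n using Nat.strong_induction_on with
  | _ n ih =>
    intro l hlen
    rcases pvDecomp l with hfree | ⟨a, m, rfl, ha⟩
    · rw [pvSplit_semifree l hfree]
      simp only [List.foldl_cons, List.foldl_nil]
      rw [pvStep_nil]
      by_cases hc : pat.isPrefixOf l ∧ l.drop pat.length ≠ []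
      · rw [if_pos hc, pvBStart_of_some (by rw [pvReTryAt_last pat l hfree, if_pos hc])]
        simp [pvReScan]
      · rw [if_neg hc, pvBStart_of_none (by rw [pvReTryAt_last pat l hfree, if_neg hc])]
        exact (pvReScan_semifree pat l hfree).symm
    · have hm : m.length < n := by
        subst hlen; simp only [List.length_append, List.length_cons]; omega
      rw [pvSplit_append a m ha]
      simp only [List.foldl_cons]
      rw [foldl_pvStep_acc pat (pvSplit m) (pvStep pat [] a)]
      rw [ih m.length hm m rfl]
      rw [pvStep_nil]
      rw [pvBStart_append pat a m hpat ha]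

-- ===== VERDICT (by name: the statement is the Claim_ definition above) =====
theorem extract_dimension_values_py_spec : Claim_equal_extract_dimension_values_py := by
  intro s t _ hpre
  unfold Spec_extract_dimension_values_py extract_dimension_values_py extract_dimension_values_py_alt
  have hpat : ';' ∉ t.toList ++ [':'] := by
    intro h
    rcases List.mem_append.mp h with h | h
    · exact hpre h
    · simp at h
  by_cases hs : s.toList = []
  · have h1 : pvReTryAt (t.toList ++ [':']) ([] : List Char) = none := by
      unfold pvReTryAt
      have hb : (t.toList ++ [':']).isPrefixOf ([] : List Char) = false := by
        rw [Bool.eq_false_iff]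
        intro hc
        have := List.prefix_nil.mp (List.isPrefixOf_iff_prefix.mp hc)
        simp at this
      simp [hb]
    simp [hs, h1, pvReScan]
  · rw [if_neg hs]
    show ((PySem.Chars.splitOn s.toList [';']).foldl (fun values part =>
        if PySem.Chars.startswith part (t.toList ++ [':']) then
          let value_part := PySem.List.slice part (some ((t.toList ++ [':']).length : Int)) none
          if value_part ≠ [] then values ++ [value_part] else values
        else values) ([] : List (List Char))).map String.ofList
      = (pvBStart (t.toList ++ [':']) s.toList).map String.ofList
    rw [portA_foldl_eq (t.toList ++ [':']) (PySem.Chars.splitOn s.toList [';'])]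
    rw [splitOn_eq, pvMain (t.toList ++ [':']) hpat s.toList]
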